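-- pv_equiv track=rewrite | github.com/davidNidam1/Genetic_algorithm_matcher | matcher.py | get_score_range
-- ===== SOURCE A (Python) =====
-- def get_score_range(men_preferences, women_preferences):
--     worst_score = 0
--     best_score = 0
--     n = len(men_preferences)
--     for i in range(n):
--         worst_score += n - 1  # Worst rank is (n-1) for 0-based index
--         best_score += 0       # Best rank is 0 for 0-based index
--     return best_score, worst_score
-- ===== SOURCE B (Python) =====
-- def get_score_range(men_preferences, women_preferences):
--     n = len(men_preferences)
--     return 0, n * (n - 1)
-- ===== Notes on version B (the rewrite author's own statement) =====
-- stated objective: simpler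
-- what changed: Replaces the counting loop with the closed form (0, n*(n-1)) where n = len(men_preferences).
import Mathlib
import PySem

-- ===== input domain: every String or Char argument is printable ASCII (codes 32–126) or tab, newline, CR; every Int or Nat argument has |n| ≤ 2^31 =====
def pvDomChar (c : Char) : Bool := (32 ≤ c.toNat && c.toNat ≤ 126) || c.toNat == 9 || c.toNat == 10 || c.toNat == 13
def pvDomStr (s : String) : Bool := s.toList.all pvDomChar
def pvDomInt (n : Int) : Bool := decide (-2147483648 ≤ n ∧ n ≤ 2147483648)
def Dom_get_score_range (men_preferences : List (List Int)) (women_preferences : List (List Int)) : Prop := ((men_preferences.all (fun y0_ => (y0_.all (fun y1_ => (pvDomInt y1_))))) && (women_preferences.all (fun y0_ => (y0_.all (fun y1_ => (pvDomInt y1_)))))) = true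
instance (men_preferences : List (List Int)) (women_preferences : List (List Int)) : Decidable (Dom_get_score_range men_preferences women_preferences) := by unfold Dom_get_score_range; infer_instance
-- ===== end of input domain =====

-- B replaces A's counting loop by the closed form (0, n*(n-1)); objective: simpler.
-- ===== PORT A =====
-- literal port of A: fold over range(n) accumulating (best_score, worst_score)
def get_score_range (men_preferences : List (List Int)) (women_preferences : List (List Int)) : Int × Int :=
  let n : Int := men_preferences.length
  let st := (PySem.List.pyRange 0 n 1).foldl
    (fun (st : Int × Int) _ => (st.1 + (n - 1), st.2 + 0)) ((0 : Int), (0 : Int))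
  -- Python returns (best_score, worst_score)
  (st.2, st.1)

-- ===== PORT B =====
-- B: closed form, no loop
def get_score_range_alt (men_preferences : List (List Int)) (women_preferences : List (List Int)) : Int × Int :=
  let n : Int := men_preferences.length
  (0, n * (n - 1))

-- ===== PRECONDITION & SPEC =====
def Spec_get_score_range (men_preferences : List (List Int)) (women_preferences : List (List Int)) (out : Int × Int) : Prop := out = get_score_range_alt men_preferences women_preferences
instance (men_preferences : List (List Int)) (women_preferences : List (List Int)) (out : Int × Int) : Decidable (Spec_get_score_range men_preferences women_preferences out) := by unfold Spec_get_score_range; infer_instance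

-- ===== CLAIM (what is proved, stated in full; the proofs are below) =====
def Claim_equal_get_score_range : Prop := ∀ (men_preferences : List (List Int)) (women_preferences : List (List Int)), Dom_get_score_range men_preferences women_preferences → Spec_get_score_range men_preferences women_preferences (get_score_range men_preferences women_preferences)

-- ===== LEMMAS AND PROOFS =====

-- ===== VERDICT (by name: the statement is the Claim_ definition above) =====
lemma foldl_acc (l : List Int) (c : Int) (a b : Int) :
    l.foldl (fun (st : Int × Int) _ => (st.1 + c, st.2 + 0)) (a, b)
      = (a + l.length * c, b) := by
  induction l generalizing a b with
  | nil => simp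
  | cons x xs ih =>
    rw [List.foldl_cons, ih]
    simp only [Prod.mk.injEq, List.length_cons]
    constructor
    · push_cast; ring
    · ring

theorem get_score_range_spec : Claim_equal_get_score_range := by
  intro m w _
  unfold Spec_get_score_range get_score_range get_score_range_alt
  simp only []
  rw [foldl_acc]
  simp [PySem.List.length_pyRange_one]
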